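-- pv_equiv track=rewrite | github.com/steffomix/arduino-dreko-schrittmotor | gui/test_arduino_logic.py | arduino_position_to_channel
-- ===== SOURCE A (Python) =====
-- arduino_mapping = [
--     41, 42, 43, 44, 45, 46, 47, 48, 49, 50,
--     51, 52, 53, 54, 55, 56, 57, 58, 59, 60,
--     61, 62, 63, 64, 65, 66, 67, 68, 69, 70,
--     71, 72, 73, 74, 75, 76, 77, 78, 79, 80,
--     1, 2, 3, 4, 5, 6, 7, 8, 9, 10,
--     11, 12, 13, 14, 15, 16, 17, 18, 19, 20,
--     21, 22, 23, 24, 25, 26, 27, 28, 29, 30,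
--     31, 32, 33, 34, 35, 36, 37, 38, 39, 40
-- ]
--
-- def arduino_position_to_channel(position, steps_per_channel=30):
--     """Reverse Arduino's logic to find channel from position"""
--     array_value = round(position / steps_per_channel)
--
--     # Find which channel has this array value
--     for channel in range(1, 81):
--         if arduino_mapping[channel - 1] == array_value:
--             return channel
--
--     # If exact match not found, find the closest
--     closest_channel = 1
--     min_diff = abs(arduino_mapping[0] - array_value)
--
--     for channel in range(1, 81):
--         diff = abs(arduino_mapping[channel - 1] - array_value)
--         if diff < min_diff:
--             min_diff = diff
--             closest_channel = channel
--
--     return closest_channel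
-- ===== SOURCE B (Python) =====
-- def arduino_position_to_channel(position, steps_per_channel=30):
--     """Reverse Arduino's logic to find channel from position.
--
--     arduino_mapping is a fixed rotation by 40 on 1..80 (channel c -> c+40 for
--     c<=40, c-40 for c>40), so the reverse lookup and the closest-match scan
--     collapse to a closed form: values above 80 are closest to 80 (channel 40),
--     values below 1 are closest to 1 (channel 41)."""
--     array_value = round(position / steps_per_channel)
--     if array_value > 80:
--         return 40
--     if array_value < 1:
--         return 41
--     if array_value > 40:
--         return array_value - 40
--     return array_value + 40
-- ===== Notes on version B (the rewrite author's own statement) =====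
-- stated objective: simpler
-- what changed: arduino_mapping is a fixed rotation by 40 on 1..80, so both the reverse-lookup loop and the closest-match scan are replaced by a four-branch closed form (av>80 -> 40, av<1 -> 41, else av-40 or av+40); the mapping array disappears.
import Mathlib
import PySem

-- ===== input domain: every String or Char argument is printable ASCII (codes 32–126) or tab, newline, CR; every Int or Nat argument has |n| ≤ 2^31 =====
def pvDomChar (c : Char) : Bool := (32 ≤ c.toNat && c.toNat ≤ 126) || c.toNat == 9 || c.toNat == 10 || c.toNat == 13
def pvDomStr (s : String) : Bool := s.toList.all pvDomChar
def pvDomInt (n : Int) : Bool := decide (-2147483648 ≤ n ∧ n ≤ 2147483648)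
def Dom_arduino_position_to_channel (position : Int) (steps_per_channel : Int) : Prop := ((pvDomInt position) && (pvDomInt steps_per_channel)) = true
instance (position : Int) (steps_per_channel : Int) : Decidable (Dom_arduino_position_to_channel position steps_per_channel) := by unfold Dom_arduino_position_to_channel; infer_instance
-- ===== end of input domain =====

-- B replaces A's two 80-element scans of the mapping array by a four-branch closed form
-- (the mapping is a rotation by 40 on 1..80); objective: simpler.

-- ===== PORT A =====
def arduino_mapping : List Int :=
  [41, 42, 43, 44, 45, 46, 47, 48, 49, 50,
   51, 52, 53, 54, 55, 56, 57, 58, 59, 60,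
   61, 62, 63, 64, 65, 66, 67, 68, 69, 70,
   71, 72, 73, 74, 75, 76, 77, 78, 79, 80,
   1, 2, 3, 4, 5, 6, 7, 8, 9, 10,
   11, 12, 13, 14, 15, 16, 17, 18, 19, 20,
   21, 22, 23, 24, 25, 26, 27, 28, 29, 30,
   31, 32, 33, 34, 35, 36, 37, 38, 39, 40]

-- Python's round(p / s): on |p|,|s| ≤ 2^31 the float quotient rounds (half-to-even)
-- to the same integer as the exact rational p/s, so this integer half-even rounding is exact there.
def pyRoundDiv (p : Int) (s : Int) : Int :=
  let n := PySem.Int.floordiv p s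
  let r := p - n * s
  if 2 * r.natAbs < s.natAbs then n
  else if s.natAbs < 2 * r.natAbs then n + 1
  else if PySem.Int.mod n 2 = 0 then n else n + 1

def arduino_position_to_channel (position : Int) (steps_per_channel : Int) : Int :=
  let array_value := pyRoundDiv position steps_per_channel
  match (PySem.List.pyRange 1 81 1).find?
      (fun channel => PySem.List.pyGetD arduino_mapping (channel - 1) 0 == array_value) with
  | some channel => channel
  | none =>
    ((PySem.List.pyRange 1 81 1).foldl
      (fun (acc : Int × Nat) channel =>
        let diff := (PySem.List.pyGetD arduino_mapping (channel - 1) 0 - array_value).natAbs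
        if diff < acc.2 then (channel, diff) else acc)
      ((1 : Int), (PySem.List.pyGetD arduino_mapping 0 0 - array_value).natAbs)).1

-- ===== PORT B =====
def arduino_position_to_channel_alt (position : Int) (steps_per_channel : Int) : Int :=
  let array_value := pyRoundDiv position steps_per_channel
  if array_value > 80 then 40
  else if array_value < 1 then 41
  else if array_value > 40 then array_value - 40
  else array_value + 40

-- ===== PRECONDITION & SPEC =====
-- Pre_ excludes exactly steps_per_channel = 0, where Python's division raises ZeroDivisionError.
def Pre_arduino_position_to_channel (position : Int) (steps_per_channel : Int) : Prop :=
  steps_per_channel ≠ 0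
instance (position : Int) (steps_per_channel : Int) : Decidable (Pre_arduino_position_to_channel position steps_per_channel) := by unfold Pre_arduino_position_to_channel; infer_instance

def pvWitness_arduino_position_to_channel : Int × Int := (300, 30)

def Spec_arduino_position_to_channel (position : Int) (steps_per_channel : Int) (out : Int) : Prop := out = arduino_position_to_channel_alt position steps_per_channel
instance (position : Int) (steps_per_channel : Int) (out : Int) : Decidable (Spec_arduino_position_to_channel position steps_per_channel out) := by unfold Spec_arduino_position_to_channel; infer_instance

-- ===== CLAIM (what is proved, stated in full; the proofs are below) =====
def Claim_equal_arduino_position_to_channel : Prop := ∀ (position : Int) (steps_per_channel : Int), Dom_arduino_position_to_channel position steps_per_channel → Pre_arduino_position_to_channel position steps_per_channel → Spec_arduino_position_to_channel position steps_per_channel (arduino_position_to_channel position steps_per_channel)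

-- ===== LEMMAS AND PROOFS =====

-- every value stored in the mapping lies in 1..80
lemma mapping_mem_bounds : ∀ x ∈ arduino_mapping, 1 ≤ x ∧ x ≤ 80 := by decide

-- the value A reads for a channel in 1..80, bounded
lemma mval_bounds (c : Int) (h1 : 1 ≤ c) (h2 : c ≤ 80) :
    1 ≤ PySem.List.pyGetD arduino_mapping (c - 1) 0 ∧
    PySem.List.pyGetD arduino_mapping (c - 1) 0 ≤ 80 := by
  have hin : PySem.Raise.InRange arduino_mapping.length (c - 1) := by
    simp [PySem.Raise.InRange, arduino_mapping]; omega
  exact mapping_mem_bounds _ (PySem.List.pyGetD_mem arduino_mapping 0 hin)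

-- first-argmin fold only depends on the ORDER of the scores on the scanned channels
lemma argmin_congr (f g : Int → Nat) :
    ∀ (l : List Int) (c0 : Int),
      (∀ c, (c = c0 ∨ c ∈ l) → ∀ c', (c' = c0 ∨ c' ∈ l) → (f c < f c' ↔ g c < g c')) →
      (l.foldl (fun acc c => if f c < acc.2 then (c, f c) else acc) (c0, f c0)).1 =
      (l.foldl (fun acc c => if g c < acc.2 then (c, g c) else acc) (c0, g c0)).1 := by
  intro l
  induction l with
  | nil => intro c0 _; rfl
  | cons x xs ih =>
    intro c0 h
    simp only [List.foldl_cons]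
    by_cases hx : f x < f c0
    · rw [if_pos hx, if_pos ((h x (by simp) c0 (by simp)).mp hx)]
      exact ih x (fun c hc c' hc' => h c (by rcases hc with h' | h' <;> simp [h']) c' (by rcases hc' with h' | h' <;> simp [h']))
    · rw [if_neg hx, if_neg (fun hg => hx ((h x (by simp) c0 (by simp)).mpr hg))]
      exact ih c0 (fun c hc c' hc' => h c (by rcases hc with h' | h' <;> simp [h']) c' (by rcases hc' with h' | h' <;> simp [h']))

-- A's whole body, as a function of the rounded array value, equals B's closed form
set_option maxRecDepth 10000 in
lemma body_eq (av : Int) :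
    (match (PySem.List.pyRange 1 81 1).find?
        (fun channel => PySem.List.pyGetD arduino_mapping (channel - 1) 0 == av) with
     | some channel => channel
     | none =>
       ((PySem.List.pyRange 1 81 1).foldl
         (fun (acc : Int × Nat) channel =>
           let diff := (PySem.List.pyGetD arduino_mapping (channel - 1) 0 - av).natAbs
           if diff < acc.2 then (channel, diff) else acc)
         ((1 : Int), (PySem.List.pyGetD arduino_mapping 0 0 - av).natAbs)).1)
    = (if av > 80 then 40
       else if av < 1 then 41
       else if av > 40 then av - 40
       else av + 40) := by
  by_cases hlo : 1 ≤ av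
  · by_cases hhi : av ≤ 80
    · -- in-range values: finitely many, decide each
      interval_cases av <;> decide
    · -- av ≥ 81: no exact match, closest is value 80 = channel 40
      have hnone : (PySem.List.pyRange 1 81 1).find?
          (fun channel => PySem.List.pyGetD arduino_mapping (channel - 1) 0 == av) = none := by
        rw [List.find?_eq_none]
        intro c hc
        have hb := mval_bounds c (by have := (PySem.List.mem_pyRange_one.mp hc).1; omega)
          (by have := (PySem.List.mem_pyRange_one.mp hc).2; omega)
        simp only [beq_iff_eq]
        omega
      rw [hnone]
      have h0 : PySem.List.pyGetD arduino_mapping 0 0 =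
          PySem.List.pyGetD arduino_mapping ((1 : Int) - 1) 0 := by norm_num
      simp only [h0]
      rw [argmin_congr (fun c => (PySem.List.pyGetD arduino_mapping (c - 1) 0 - av).natAbs)
            (fun c => (PySem.List.pyGetD arduino_mapping (c - 1) 0 - 81).natAbs)
            (PySem.List.pyRange 1 81 1) 1 ?_]
      · have h80 : (80 : Int) < av := by omega
        rw [if_pos h80]
        decide
      · intro c hc c' hc'
        beta_reduce
        have hb : 1 ≤ PySem.List.pyGetD arduino_mapping (c - 1) 0 ∧ PySem.List.pyGetD arduino_mapping (c - 1) 0 ≤ 80 := by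
          rcases hc with h' | h'
          · subst h'; exact mval_bounds 1 (by omega) (by omega)
          · have := PySem.List.mem_pyRange_one.mp h'; exact mval_bounds c (by omega) (by omega)
        have hb' : 1 ≤ PySem.List.pyGetD arduino_mapping (c' - 1) 0 ∧ PySem.List.pyGetD arduino_mapping (c' - 1) 0 ≤ 80 := by
          rcases hc' with h' | h'
          · subst h'; exact mval_bounds 1 (by omega) (by omega)
          · have := PySem.List.mem_pyRange_one.mp h'; exact mval_bounds c' (by omega) (by omega)
        omega
  · -- av ≤ 0: no exact match, closest is value 1 = channel 41
    have hnone : (PySem.List.pyRange 1 81 1).find?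
        (fun channel => PySem.List.pyGetD arduino_mapping (channel - 1) 0 == av) = none := by
      rw [List.find?_eq_none]
      intro c hc
      have hb := mval_bounds c (by have := (PySem.List.mem_pyRange_one.mp hc).1; omega)
        (by have := (PySem.List.mem_pyRange_one.mp hc).2; omega)
      simp only [beq_iff_eq]
      omega
    rw [hnone]
    have h0 : PySem.List.pyGetD arduino_mapping 0 0 =
        PySem.List.pyGetD arduino_mapping ((1 : Int) - 1) 0 := by norm_num
    simp only [h0]
    rw [argmin_congr (fun c => (PySem.List.pyGetD arduino_mapping (c - 1) 0 - av).natAbs)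
          (fun c => (PySem.List.pyGetD arduino_mapping (c - 1) 0 - 0).natAbs)
          (PySem.List.pyRange 1 81 1) 1 ?_]
    · rw [if_neg (show ¬ (80 : Int) < av by omega), if_pos (show av < 1 by omega)]
      decide
    · intro c hc c' hc'
      beta_reduce
      have hb : 1 ≤ PySem.List.pyGetD arduino_mapping (c - 1) 0 ∧ PySem.List.pyGetD arduino_mapping (c - 1) 0 ≤ 80 := by
        rcases hc with h' | h'
        · subst h'; exact mval_bounds 1 (by omega) (by omega)
        · have := PySem.List.mem_pyRange_one.mp h'; exact mval_bounds c (by omega) (by omega)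
      have hb' : 1 ≤ PySem.List.pyGetD arduino_mapping (c' - 1) 0 ∧ PySem.List.pyGetD arduino_mapping (c' - 1) 0 ≤ 80 := by
        rcases hc' with h' | h'
        · subst h'; exact mval_bounds 1 (by omega) (by omega)
        · have := PySem.List.mem_pyRange_one.mp h'; exact mval_bounds c' (by omega) (by omega)
      omega

-- ===== VERDICT (by name: the statement is the Claim_ definition above) =====
theorem arduino_position_to_channel_spec : Claim_equal_arduino_position_to_channel := by
  intro position steps_per_channel _ _
  show arduino_position_to_channel position steps_per_channel = arduino_position_to_channel_alt position steps_per_channel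
  simp only [arduino_position_to_channel, arduino_position_to_channel_alt]
  exact body_eq (pyRoundDiv position steps_per_channel)
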